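-- pv_equiv track=rewrite | github.com/Glebchik57/Sarafan_market | the_first_task.py | print_sequence
-- ===== SOURCE A (Python) =====
-- def print_sequence(sequence):
--     result = ""
--     cnt = 0
--     for el in sequence:
--         if cnt == 0:
--             cnt+=int(el)-1
--             result+=el
--         else:
--             cnt-=1
--     return result
-- ===== SOURCE B (Python) =====
-- def print_sequence(sequence):
--     seq = list(sequence)
--     result = []
--     i = 0
--     while i < len(seq):
--         el = seq[i]
--         result.append(el)
--         step = int(el)
--         if step <= 0:
--             break
--         i += step
--     return "".join(result)
-- ===== Notes on version B (the rewrite author's own statement) =====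
-- stated objective: alternative
-- what changed: Replaces the per-element counter loop (which visits and decrements through every skipped element) with an index-jumping while loop that hops directly from one kept element to the next and joins the kept pieces at the end.
import Mathlib
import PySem

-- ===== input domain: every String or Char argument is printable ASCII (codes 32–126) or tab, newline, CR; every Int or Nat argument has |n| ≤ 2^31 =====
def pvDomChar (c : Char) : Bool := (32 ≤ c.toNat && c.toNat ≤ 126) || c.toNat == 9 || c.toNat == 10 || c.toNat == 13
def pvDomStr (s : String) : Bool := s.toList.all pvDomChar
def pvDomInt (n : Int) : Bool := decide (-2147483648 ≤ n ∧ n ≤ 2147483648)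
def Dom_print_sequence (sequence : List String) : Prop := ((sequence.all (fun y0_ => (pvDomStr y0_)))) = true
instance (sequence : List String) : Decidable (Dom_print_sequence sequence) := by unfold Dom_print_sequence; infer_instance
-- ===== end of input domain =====

-- B replaces A's per-element skip counter with an index-jumping loop over the kept elements;
-- equivalence is about the RETURN value (neither version mutates its argument).

-- ===== PORT A =====
-- A's for-loop over (result, cnt); int(el) is only reached with cnt = 0, and Pre_ guarantees it parses,
-- so the getD 0 default is never used on admitted inputs.
def pvLoopA : String → Int → List String → String
  | result, _, [] => result
  | result, cnt, el :: rest =>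
    if cnt = 0 then
      pvLoopA (result ++ el) (cnt + ((PySem.Int.ofStr? el).getD 0 - 1)) rest
    else
      pvLoopA result (cnt - 1) rest

def print_sequence (sequence : List String) : String :=
  pvLoopA "" 0 sequence

-- ===== PORT B =====
-- B's while loop: at index i keep seq[i], step = int(seq[i]); stop if step ≤ 0, else jump i += step.
-- The jump i += step is the drop of (step-1) elements after the kept head.
def pvJumpB : List String → String
  | [] => ""
  | el :: rest =>
    let step : Int := (PySem.Int.ofStr? el).getD 0
    if step ≤ 0 then el
    else el ++ pvJumpB (rest.drop (step.toNat - 1))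
termination_by l => l.length
decreasing_by simp

def print_sequence_alt (sequence : List String) : String :=
  pvJumpB sequence

-- ===== PRECONDITION & SPEC =====
-- A raises ValueError exactly when int() is applied to an element it cannot parse; int() is only
-- applied to the elements at skip-count 0 (each names how many following elements are skipped), so A's
-- exact domain is: every such element parses. pvPreChain checks only parseability, never an output value.
def pvPreChain : Int → List String → Bool
  | _, [] => true
  | c, el :: rest =>
    if c = 0 then
      match PySem.Int.ofStr? el with
      | none => false
      | some step => pvPreChain (step - 1) rest
    else pvPreChain (c - 1) rest

def Pre_print_sequence (sequence : List String) : Prop :=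
  pvPreChain 0 sequence = true
instance (sequence : List String) : Decidable (Pre_print_sequence sequence) := by
  unfold Pre_print_sequence; infer_instance
def pvWitness_print_sequence : List String := ["3", "0", "1", "2", "5"]

def Spec_print_sequence (sequence : List String) (out : String) : Prop := out = print_sequence_alt sequence
instance (sequence : List String) (out : String) : Decidable (Spec_print_sequence sequence out) := by unfold Spec_print_sequence; infer_instance

-- ===== CLAIM (what is proved, stated in full; the proofs are below) =====
def Claim_equal_print_sequence : Prop := ∀ (sequence : List String), Dom_print_sequence sequence → Pre_print_sequence sequence → Spec_print_sequence sequence (print_sequence sequence)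

-- ===== LEMMAS AND PROOFS =====

theorem pvJumpB_nil : pvJumpB [] = "" := by rw [pvJumpB]

theorem pvJumpB_cons (el : String) (rest : List String) :
    pvJumpB (el :: rest) =
      (let step : Int := (PySem.Int.ofStr? el).getD 0
       if step ≤ 0 then el else el ++ pvJumpB (rest.drop (step.toNat - 1))) := by
  rw [pvJumpB]

-- once cnt is negative it never returns to 0: everything remaining is skipped
theorem pvLoopA_neg (xs : List String) : ∀ (r : String) (c : Int), c < 0 → pvLoopA r c xs = r := by
  induction xs with
  | nil => intro r c _; rfl
  | cons el rest ih =>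
    intro r c hc
    rw [pvLoopA]
    rw [if_neg (by omega)]
    exact ih r (c - 1) (by omega)

-- a nonnegative counter c just skips the next c elements
theorem pvLoopA_skip (xs : List String) : ∀ (r : String) (c : Int), 0 ≤ c →
    pvLoopA r c xs = pvLoopA r 0 (xs.drop c.toNat) := by
  induction xs with
  | nil => intro r c _; simp [pvLoopA]
  | cons el rest ih =>
    intro r c hc
    by_cases h0 : c = 0
    · simp [h0]
    · rw [pvLoopA, if_neg h0]
      rw [ih r (c - 1) (by omega)]
      have : ((el :: rest).drop c.toNat) = rest.drop (c - 1).toNat := by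
        have : c.toNat = (c - 1).toNat + 1 := by omega
        rw [this, List.drop_succ_cons]
      rw [this]

theorem pvLoopA_eq_jump (n : Nat) : ∀ (xs : List String), xs.length ≤ n →
    ∀ (r : String), pvLoopA r 0 xs = r ++ pvJumpB xs := by
  induction n with
  | zero =>
    intro xs hxs r
    have : xs = [] := List.eq_nil_of_length_eq_zero (by omega)
    subst this; simp [pvLoopA, pvJumpB_nil]
  | succ n ih =>
    intro xs hxs r
    match xs with
    | [] => simp [pvLoopA, pvJumpB_nil]
    | el :: rest =>
      rw [pvLoopA, if_pos rfl, pvJumpB_cons]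
      simp only []
      set step : Int := (PySem.Int.ofStr? el).getD 0 with hstep
      by_cases hle : step ≤ 0
      · rw [if_pos hle]
        have : (0 : Int) + (step - 1) < 0 := by omega
        rw [pvLoopA_neg rest _ _ this]
      · rw [if_neg hle]
        have h1 : (0 : Int) + (step - 1) = step - 1 := by omega
        rw [h1, pvLoopA_skip rest _ (step - 1) (by omega)]
        have h2 : (step - 1).toNat = step.toNat - 1 := by omega
        rw [h2]
        rw [ih (rest.drop (step.toNat - 1)) (by simp at hxs ⊢; omega) (r ++ el)]
        rw [String.append_assoc]

-- ===== VERDICT (by name: the statement is the Claim_ definition above) =====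
theorem print_sequence_spec : Claim_equal_print_sequence := by
  intro sequence _ _
  unfold Spec_print_sequence print_sequence print_sequence_alt
  simpa using pvLoopA_eq_jump sequence.length sequence (le_refl _) ""
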